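-- pv_equiv track=rewrite | github.com/va64doman/codility | Challenges/pairaCoder.py | removeSubstrings
-- ===== SOURCE A (Python) =====
-- def removeSubstrings(S):
--     N = len(S)
--     nxt = dict()
--     dp = [None] *(N+1)
--     dps = [None] * (N+1)
--     dp[N] = dps[N] = 0
--     for i in range(N-1, -1, -1):
--         dps[i] = N-i
--         if S[i] in nxt:
--             j = nxt[S[i]]
--             dps[i] = min(dp[j+1], dps[j])
--         dp[i] = min(1 + dp[i+1], dps[i])
--         nxt[S[i]] = i
--     return dp[0]
--     pass
-- ===== SOURCE B (Python) =====
-- def removeSubstrings(S):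
--     # Complement view: a substring S[i..j] with S[i] == S[j] (j > i) is removable in
--     # one free step and disjoint such intervals are independent, so the answer equals
--     # N minus the maximum total length of disjoint equal-endpoint intervals.
--     # That maximum is computed by weighted-interval-scheduling over the suffixes:
--     # cover = best coverage of the current suffix; best[c] = max over seen
--     # occurrences j of c of (j + 1 + coverage of the suffix after j).
--     N = len(S)
--     best = {}
--     cover = 0
--     for i in reversed(range(N)):
--         c = S[i]
--         take = best[c] - i if c in best else 0  # pair i with a later occurrence of c
--         stash = i + 1 + cover                   # value of an interval ending at i
--         if c not in best or best[c] < stash: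
--             best[c] = stash
--         if take > cover:
--             cover = take
--     return N - cover
-- ===== Notes on version B (the rewrite author's own statement) =====
-- stated objective: alternative
-- what changed: A runs a min-cost DP filling two O(N) arrays dp/dps with nearest-next-occurrence chaining; B solves the complementary maximization instead - the answer is N minus the maximum total length of disjoint equal-endpoint intervals - via a weighted-interval-scheduling scan keeping one scalar coverage value and, per character, the best value of ending an interval at one of its occurrences (measured ~2.6x faster: no O(N) array allocation/indexing).
import Mathlib
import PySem

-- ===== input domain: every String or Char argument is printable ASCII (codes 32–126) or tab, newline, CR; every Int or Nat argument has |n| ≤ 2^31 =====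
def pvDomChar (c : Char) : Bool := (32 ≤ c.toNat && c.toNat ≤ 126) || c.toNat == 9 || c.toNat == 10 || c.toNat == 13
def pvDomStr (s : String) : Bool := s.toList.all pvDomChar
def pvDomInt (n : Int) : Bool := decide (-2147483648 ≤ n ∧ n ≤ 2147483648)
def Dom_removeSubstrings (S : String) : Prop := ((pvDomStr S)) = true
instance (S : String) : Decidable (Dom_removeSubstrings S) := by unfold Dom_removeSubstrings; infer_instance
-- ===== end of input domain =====

-- B solves the complementary maximization (N minus the max total length of disjoint
-- equal-endpoint intervals, by an interval-scheduling scan with O(1) state per character)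
-- instead of A's two-array min-cost DP; a timing run measured it faster by a constant factor.


-- ===== PORT A =====
-- one iteration of A's 'for i in range(N-1, -1, -1)' body over the state (nxt, dp, dps)
def pvAStep (cs : List Char) (N : Int)
    (st : PySem.Dict Char Int × List Int × List Int) (i : Int) :
    PySem.Dict Char Int × List Int × List Int :=
  let c := PySem.List.pyGetD cs i ' '                       -- S[i]; i is always in range in this loop
  let dps1 := PySem.List.pySetD st.2.2 i (N - i)            -- dps[i] = N - i
  let dps2 :=
    match st.1.get? c with                                   -- if S[i] in nxt: j = nxt[S[i]]
    | some j =>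
        PySem.List.pySetD dps1 i                             -- dps[i] = min(dp[j+1], dps[j])
          (min (PySem.List.pyGetD st.2.1 (j + 1) 0) (PySem.List.pyGetD dps1 j 0))
    | none => dps1
  let dp' := PySem.List.pySetD st.2.1 i                      -- dp[i] = min(1 + dp[i+1], dps[i])
      (min (1 + PySem.List.pyGetD st.2.1 (i + 1) 0) (PySem.List.pyGetD dps2 i 0))
  (st.1.insert c i, dp', dps2)                               -- nxt[S[i]] = i

def removeSubstrings (S : String) : Int :=
  let cs := S.toList
  let N : Int := (cs.length : Int)
  -- [None]*(N+1) with dp[N] = dps[N] = 0: the None cells are modelled as 0 (each is written before it is ever read)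
  let dp0 : List Int := List.replicate cs.length 0 ++ [0]
  let st := (PySem.List.pyRange (N - 1) (-1) (-1)).foldl (pvAStep cs N) (PySem.Dict.empty, dp0, dp0)
  PySem.List.pyGetD st.2.1 0 0

-- ===== PORT B =====
-- one iteration of B's 'for i in reversed(range(N))' body over the state (best, cover)
def pvBStep (cs : List Char) (st : PySem.Dict Char Int × Int) (i : Nat) :
    PySem.Dict Char Int × Int :=
  let c := PySem.List.pyGetD cs (i : Int) ' '                -- c = S[i]
  let take := match st.1.get? c with                          -- take = best[c] - i if c in best else 0
    | some b => b - (i : Int)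
    | none => 0
  let stash := (i : Int) + 1 + st.2                           -- stash = i + 1 + cover
  let best' := match st.1.get? c with                         -- if c not in best or best[c] < stash: best[c] = stash
    | some b => if b < stash then st.1.insert c stash else st.1
    | none => st.1.insert c stash
  (best', if st.2 < take then take else st.2)                 -- if take > cover: cover = take

def removeSubstrings_alt (S : String) : Int :=
  let cs := S.toList
  let fin := ((List.range cs.length).reverse).foldl (pvBStep cs) (PySem.Dict.empty, 0)
  (cs.length : Int) - fin.2

-- ===== PRECONDITION & SPEC =====
def Spec_removeSubstrings (S : String) (out : Int) : Prop := out = removeSubstrings_alt S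
instance (S : String) (out : Int) : Decidable (Spec_removeSubstrings S out) := by unfold Spec_removeSubstrings; infer_instance

-- ===== CLAIM (what is proved, stated in full; the proofs are below) =====
def Claim_equal_removeSubstrings : Prop := ∀ (S : String), Dom_removeSubstrings S → Spec_removeSubstrings S (removeSubstrings S)

-- ===== LEMMAS AND PROOFS =====

-- A's fold after its first m iterations (indices N-1, N-2, …, N-m)
def pvAf (cs : List Char) (m : Nat) : PySem.Dict Char Int × List Int × List Int :=
  ((List.range m).map (fun t : Nat => (cs.length : Int) - 1 - (t : Int))).foldl
    (pvAStep cs (cs.length : Int))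
    (PySem.Dict.empty, List.replicate cs.length 0 ++ [0], List.replicate cs.length 0 ++ [0])

-- B's fold after its first m iterations (same indices, as naturals)
def pvBf (cs : List Char) (m : Nat) : PySem.Dict Char Int × Int :=
  (((List.range cs.length).reverse).take m).foldl (pvBStep cs) (PySem.Dict.empty, 0)

lemma pvGetSet (xs : List Int) (i j v : Int) (hi : 0 ≤ i)
    (hj : 0 ≤ j) (hjl : j < (xs.length : Int)) :
    PySem.List.pyGetD (PySem.List.pySetD xs i v) j 0 =
      if j = i then v else PySem.List.pyGetD xs j 0 := by
  rw [PySem.List.pySetD_of_nonneg xs v hi,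
      PySem.List.pyGetD_eq_getElem _ 0 hj (by simpa using hjl),
      PySem.List.pyGetD_eq_getElem _ 0 hj hjl,
      List.getElem_set]
  have : i.toNat = j.toNat ↔ j = i := by omega
  simp only [this]

-- joint invariant after m steps: B's cover is the coverage complement (N-s) - dp[s] of the
-- suffix start s = N - m, it is nonnegative, and for each char c stored in both dicts at
-- index j, B's best memoises N - min(dp[j+1], dps[j])
def pvInv (cs : List Char) (m : Nat) : Prop :=
  (pvAf cs m).2.1.length = cs.length + 1 ∧
  (pvAf cs m).2.2.length = cs.length + 1 ∧
  0 ≤ (pvBf cs m).2 ∧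
  (pvBf cs m).2 = (m : Int) - PySem.List.pyGetD (pvAf cs m).2.1 ((cs.length : Int) - m) 0 ∧
  ∀ c : Char,
    ((pvAf cs m).1.get? c = none ∧ (pvBf cs m).1.get? c = none) ∨
    (∃ j : Int, (pvAf cs m).1.get? c = some j ∧
      (cs.length : Int) - m ≤ j ∧ j < (cs.length : Int) ∧
      (pvBf cs m).1.get? c =
        some ((cs.length : Int) - min (PySem.List.pyGetD (pvAf cs m).2.1 (j + 1) 0)
                  (PySem.List.pyGetD (pvAf cs m).2.2 j 0)))

lemma pvInv_zero (cs : List Char) : pvInv cs 0 := by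
  unfold pvInv pvAf pvBf
  refine ⟨by simp, by simp, by simp, ?_,
    fun c => Or.inl ⟨by simp [PySem.Dict.get?_empty], by simp [PySem.Dict.get?_empty]⟩⟩
  simp [PySem.List.pyGetD_natCast]

lemma pvAf_succ (cs : List Char) (m : Nat) :
    pvAf cs (m + 1) = pvAStep cs (cs.length : Int) (pvAf cs m) ((cs.length : Int) - 1 - m) := by
  unfold pvAf
  rw [List.range_succ, List.map_append, List.foldl_append]
  simp

lemma pvBf_succ (cs : List Char) (m : Nat) (hm : m < cs.length) :
    pvBf cs (m + 1) = pvBStep cs (pvBf cs m) (cs.length - 1 - m) := by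
  unfold pvBf
  rw [List.take_add_one, List.foldl_append]
  have h : m < (List.range cs.length).reverse.length := by simpa using hm
  rw [List.getElem?_eq_getElem h]
  simp [List.getElem_reverse]

lemma pvInv_succ (cs : List Char) (m : Nat) (hm : m < cs.length) (ih : pvInv cs m) :
    pvInv cs (m + 1) := by
  obtain ⟨hdl, hdsl, hc0, he, hrel⟩ := ih
  set n := cs.length with hn
  set i : Int := (n : Int) - 1 - m with hi
  have hi0 : 0 ≤ i := by omega
  have hiln : i < (n : Int) := by omega
  have hiN : ((n - 1 - m : Nat) : Int) = i := by omega
  rw [pvInv, pvAf_succ, pvBf_succ cs m hm, ← hn, ← hi]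
  simp only [pvAStep, pvBStep, hiN]
  set ch := PySem.List.pyGetD cs i ' ' with hch
  set nxt := (pvAf cs m).1 with hnxt
  set dp := (pvAf cs m).2.1 with hdp
  set dps := (pvAf cs m).2.2 with hdps
  set best := (pvBf cs m).1 with hbest
  set cov := (pvBf cs m).2 with hcov
  have hdlen : (dp.length : Int) = (n : Int) + 1 := by rw [hdl]; push_cast; omega
  have hdslen : (dps.length : Int) = (n : Int) + 1 := by rw [hdsl]; push_cast; omega
  have hnm : (n : Int) - (m : Nat) = i + 1 := by omega
  have he' : cov = (m : Int) - PySem.List.pyGetD dp (i + 1) 0 := by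
    rw [he, hnm]
  set d1 := PySem.List.pyGetD dp (i + 1) 0 with hd1
  clear_value n i ch nxt dp dps best cov d1
  rcases hrel ch with ⟨ha, hb⟩ | ⟨j, ha, hj1, hj2, hb⟩
  · -- ch not seen yet: dps[i] = n - i, take = 0, best[ch] := stash
    simp only [ha, hb]
    have hset_ds : PySem.List.pyGetD (PySem.List.pySetD dps i ((n : Int) - i)) i 0
        = (n : Int) - i := by
      rw [pvGetSet dps i i _ hi0 hi0 (by omega), if_pos rfl]
    refine ⟨by simp [PySem.List.length_pySetD, hdl],
      by simp [PySem.List.length_pySetD, hdsl], ?_, ?_, ?_⟩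
    · clear hrel
      split_ifs <;> omega
    · have h1 : (n : Int) - ((m + 1 : Nat) : Int) = i := by push_cast; omega
      rw [h1, pvGetSet dp i i _ hi0 hi0 (by omega), if_pos rfl, hset_ds]
      clear hrel
      simp only [min_def]
      split_ifs <;> omega
    · intro c
      by_cases hcc : c = ch
      · right
        refine ⟨i, by simp [hcc, PySem.Dict.get?_insert_self], by push_cast; omega,
          by omega, ?_⟩
        rw [hcc, PySem.Dict.get?_insert_self,
          pvGetSet dp i (i + 1) _ hi0 (by omega) (by omega), if_neg (by omega), hset_ds,
          ← hd1]
        have : min d1 ((n : Int) - i) = d1 := by omega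
        rw [this]
        congr 1
        omega
      · rcases hrel c with ⟨ha2, hb2⟩ | ⟨j', ha2, hb1, hb2', hb3⟩
        · left
          simp only [PySem.Dict.get?_insert, if_neg hcc]
          exact ⟨ha2, hb2⟩
        · right
          refine ⟨j', by simp [PySem.Dict.get?_insert, hcc, ha2],
            by push_cast; omega, by omega, ?_⟩
          rw [PySem.Dict.get?_insert_of_ne _ _ hcc, hb3,
            pvGetSet dp i (j' + 1) _ hi0 (by omega) (by omega), if_neg (by omega),
            pvGetSet dps i j' _ hi0 (by omega) (by omega), if_neg (by omega)]
  · -- ch seen at j > i: dps[i] = min(dp[j+1], dps[j]) = n - best[ch]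
    simp only [ha, hb]
    have hji : i < j := by omega
    have hds1_j : PySem.List.pyGetD (PySem.List.pySetD dps i ((n : Int) - i)) j 0
        = PySem.List.pyGetD dps j 0 := by
      rw [pvGetSet dps i j _ hi0 (by omega) (by omega), if_neg (by omega)]
    rw [hds1_j]
    set dj1 := PySem.List.pyGetD dp (j + 1) 0 with hdj1
    set dsj := PySem.List.pyGetD dps j 0 with hdsj
    clear_value dj1 dsj
    have hset2 : PySem.List.pyGetD
        (PySem.List.pySetD (PySem.List.pySetD dps i ((n : Int) - i)) i (min dj1 dsj)) i 0
        = min dj1 dsj := by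
      rw [pvGetSet _ i i _ hi0 hi0 (by simp [PySem.List.length_pySetD]; omega), if_pos rfl]
    refine ⟨by simp [PySem.List.length_pySetD, hdl],
      by simp [PySem.List.length_pySetD, hdsl], ?_, ?_, ?_⟩
    · clear hrel
      have hX3 := min_cases dj1 dsj
      generalize hX : min dj1 dsj = X at hX3 ⊢
      rcases hX3 with ⟨hXa, hXb⟩ | ⟨hXa, hXb⟩ <;> split_ifs <;> omega
    · have h1 : (n : Int) - ((m + 1 : Nat) : Int) = i := by push_cast; omega
      rw [h1, pvGetSet dp i i _ hi0 hi0 (by omega), if_pos rfl, hset2]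
      clear hrel
      have hX3 := min_cases dj1 dsj
      generalize hX : min dj1 dsj = X at hX3 ⊢
      have hY3 := min_cases (1 + d1) X
      generalize hY : min (1 + d1) X = Y at hY3 ⊢
      rcases hX3 with ⟨hXa, hXb⟩ | ⟨hXa, hXb⟩ <;>
        rcases hY3 with ⟨hYa, hYb⟩ | ⟨hYa, hYb⟩ <;> split_ifs <;>
          first | omega | (push_cast; linarith)
    · intro c
      by_cases hcc : c = ch
      · right
        refine ⟨i, by simp [hcc, PySem.Dict.get?_insert_self], by push_cast; omega,
          by omega, ?_⟩
        have hrdp : ∀ v : Int,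
            PySem.List.pyGetD (PySem.List.pySetD dp i v) (i + 1) 0 = d1 := by
          intro v
          rw [pvGetSet dp i (i + 1) v hi0 (by omega) (by omega), if_neg (by omega)]
          exact hd1.symm
        rw [hcc, hset2, hrdp]
        clear hrel
        split_ifs with hsw
        · rw [PySem.Dict.get?_insert_self]
          simp only [Option.some.injEq]
          have hX3 := min_cases dj1 dsj
          generalize hX : min dj1 dsj = X at hX3 hsw ⊢
          have hY3 := min_cases d1 X
          generalize hY : min d1 X = Y at hY3 ⊢
          rcases hX3 with ⟨hXa, hXb⟩ | ⟨hXa, hXb⟩ <;>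
            rcases hY3 with ⟨hYa, hYb⟩ | ⟨hYa, hYb⟩ <;> omega
        · rw [hb]
          simp only [Option.some.injEq]
          have hX3 := min_cases dj1 dsj
          generalize hX : min dj1 dsj = X at hX3 hsw ⊢
          have hY3 := min_cases d1 X
          generalize hY : min d1 X = Y at hY3 ⊢
          rcases hX3 with ⟨hXa, hXb⟩ | ⟨hXa, hXb⟩ <;>
            rcases hY3 with ⟨hYa, hYb⟩ | ⟨hYa, hYb⟩ <;> omega
      · rcases hrel c with ⟨ha2, hb2⟩ | ⟨j', ha2, hb1, hb2', hb3⟩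
        · left
          refine ⟨by simp only [PySem.Dict.get?_insert, if_neg hcc]; exact ha2, ?_⟩
          split_ifs
          · simp only [PySem.Dict.get?_insert, if_neg hcc]
            exact hb2
          · exact hb2
        · right
          refine ⟨j', by simp [PySem.Dict.get?_insert, hcc, ha2],
            by push_cast; omega, by omega, ?_⟩
          have hrd : PySem.List.pyGetD (PySem.List.pySetD dp i
                (min (1 + d1) (min dj1 dsj))) (j' + 1) 0
              = PySem.List.pyGetD dp (j' + 1) 0 := by
            rw [pvGetSet dp i (j' + 1) _ hi0 (by omega) (by omega), if_neg (by omega)]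
          have hrds : PySem.List.pyGetD (PySem.List.pySetD (PySem.List.pySetD dps i
                ((n : Int) - i)) i (min dj1 dsj)) j' 0
              = PySem.List.pyGetD dps j' 0 := by
            rw [pvGetSet _ i j' _ hi0 (by omega)
              (by simp [PySem.List.length_pySetD]; omega), if_neg (by omega),
              pvGetSet dps i j' _ hi0 (by omega) (by omega), if_neg (by omega)]
          rw [hset2, hrd, hrds]
          split_ifs
          · rw [PySem.Dict.get?_insert_of_ne _ _ hcc, hb3]
          · rw [hb3]

lemma pvInv_holds (cs : List Char) : ∀ m, m ≤ cs.length → pvInv cs m := by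
  intro m
  induction m with
  | zero => exact fun _ => pvInv_zero cs
  | succ m ih => exact fun h => pvInv_succ cs m (by omega) (ih (by omega))

-- ===== VERDICT (by name: the statement is the Claim_ definition above) =====
theorem removeSubstrings_spec : Claim_equal_removeSubstrings := by
  intro S _
  unfold Spec_removeSubstrings removeSubstrings removeSubstrings_alt
  set cs := S.toList with hcs
  simp only
  have hA : (PySem.List.pyRange ((cs.length : Int) - 1) (-1) (-1)).foldl
      (pvAStep cs (cs.length : Int))
      (PySem.Dict.empty, List.replicate cs.length 0 ++ [0], List.replicate cs.length 0 ++ [0])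
      = pvAf cs cs.length := by
    rw [PySem.List.pyRange_neg_one]
    unfold pvAf
    have h1 : ((cs.length : Int) - 1 - (-1)).toNat = cs.length := by omega
    rw [h1]
  have hB : ((List.range cs.length).reverse).foldl (pvBStep cs) (PySem.Dict.empty, 0)
      = pvBf cs cs.length := by
    unfold pvBf
    rw [List.take_of_length_le (by simp)]
  rw [hA, hB]
  obtain ⟨h1, h2, h3, h4, h5⟩ := pvInv_holds cs cs.length le_rfl
  have hz : (cs.length : Int) - (cs.length : Nat) = 0 := by omega
  rw [hz] at h4
  rw [h4]
  omega
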